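-- pv_equiv track=rewrite | github.com/pavecer/mcs-agent-tools | web/state.py | _md_to_segments
-- ===== SOURCE A (Python) =====
-- def _md_to_segments(md: str) -> list[dict]:
--     """Split a Markdown string into text / mermaid fence segments."""
--     if not md:
--         return []
--     segments: list[dict] = []
--     remaining = md
--     fence_open = "```mermaid"
--     fence_close = "```"
--     while remaining:
--         start = remaining.find(fence_open)
--         if start == -1:
--             segments.append({"type": "text", "content": remaining})
--             break
--         if start > 0:
--             segments.append({"type": "text", "content": remaining[:start]})
--         rest = remaining[start + len(fence_open) :]
--         end = rest.find(fence_close)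
--         if end == -1:
--             segments.append({"type": "text", "content": fence_open + rest})
--             break
--         mermaid_src = rest[:end].strip()
--         segments.append({"type": "mermaid", "content": mermaid_src})
--         remaining = rest[end + len(fence_close) :]
--     return segments
-- ===== SOURCE B (Python) =====
-- def _md_to_segments(md: str) -> list[dict]:
--     """Split a Markdown string into text / mermaid fence segments."""
--     FENCE = "```mermaid"
--     CLOSE = "```"
--
--     def go(s: str) -> list[dict]:
--         if not s:
--             return []
--         pre, sep, rest = s.partition(FENCE)
--         if not sep:
--             return [{"type": "text", "content": s}]
--         head = [{"type": "text", "content": pre}] if pre else []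
--         src, sep2, tail = rest.partition(CLOSE)
--         if not sep2:
--             return head + [{"type": "text", "content": FENCE + rest}]
--         return head + [{"type": "mermaid", "content": src.strip()}] + go(tail)
--
--     return go(md)
-- ===== Notes on version B (the rewrite author's own statement) =====
-- stated objective: simpler
-- what changed: Replaced the imperative while-loop with manual find/slice index arithmetic and an accumulator list by a recursive decomposition using str.partition, which yields each segment directly from the (pre, sep, rest) triple.
import Mathlib
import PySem

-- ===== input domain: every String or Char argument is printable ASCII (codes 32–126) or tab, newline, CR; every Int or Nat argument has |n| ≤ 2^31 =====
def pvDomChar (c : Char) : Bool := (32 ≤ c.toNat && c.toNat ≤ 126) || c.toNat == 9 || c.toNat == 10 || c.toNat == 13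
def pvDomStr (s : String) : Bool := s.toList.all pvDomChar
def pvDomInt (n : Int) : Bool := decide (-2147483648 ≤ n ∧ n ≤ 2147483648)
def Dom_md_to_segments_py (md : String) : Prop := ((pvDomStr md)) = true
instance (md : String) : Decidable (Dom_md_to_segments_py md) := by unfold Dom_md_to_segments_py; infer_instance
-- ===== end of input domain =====

-- B replaces A's while-loop with find/slice index arithmetic and an accumulator
-- by a recursive decomposition via str.partition (simpler; return value only, no mutation).

-- ===== PORT A =====
-- fence_open / fence_close of A
def pvFenceOpenA : List Char := "```mermaid".toList
def pvFenceCloseA : List Char := "```".toList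

-- termination helpers (cited by the ports' decreasing_by)
theorem pvSliceFrom_length (xs : List Char) (a : Int) (h : 0 ≤ a) :
    (PySem.Chars.slice xs (some a) none).length = xs.length - a.toNat := by
  simp [PySem.List.slice_from _ h]

theorem pvSliceFrom_len_le (xs : List Char) (a : Int) :
    (PySem.Chars.slice xs (some a) none).length ≤ xs.length := by
  rw [PySem.Chars.slice_eq_listSlice, PySem.List.slice_some_none]
  simp

theorem pvFind_occ (s sub : List Char) (h : PySem.Chars.find s sub ≠ -1) :
    (PySem.Chars.find s sub).toNat + sub.length ≤ s.length ∧ 0 ≤ PySem.Chars.find s sub := by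
  have h0 : 0 ≤ PySem.Chars.find s sub := by
    rcases (PySem.Chars.neg_one_le_find s sub).lt_or_eq with h' | h'
    · omega
    · exact absurd h'.symm h
  have hlen := ((PySem.Chars.find_spec h0).1).length_le
  rw [List.length_drop] at hlen
  have hle := PySem.Chars.find_le_length s sub
  exact ⟨by omega, h0⟩

theorem pvLoopA_dec (remaining : List Char)
    (hs : ¬ PySem.Chars.find remaining pvFenceOpenA = -1) :
    (PySem.Chars.slice
      (PySem.Chars.slice remaining (some (PySem.Chars.find remaining pvFenceOpenA + 10)) none)
      (some (PySem.Chars.find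
        (PySem.Chars.slice remaining (some (PySem.Chars.find remaining pvFenceOpenA + 10)) none)
        pvFenceCloseA + 3)) none).length < remaining.length := by
  obtain ⟨hocc, h0⟩ := pvFind_occ remaining pvFenceOpenA hs
  have hf : pvFenceOpenA.length = 10 := rfl
  have hA : (PySem.Chars.slice remaining (some (PySem.Chars.find remaining pvFenceOpenA + 10)) none).length
      = remaining.length - (PySem.Chars.find remaining pvFenceOpenA + 10).toNat :=
    pvSliceFrom_length _ _ (by omega)
  have hB := pvSliceFrom_len_le
    (PySem.Chars.slice remaining (some (PySem.Chars.find remaining pvFenceOpenA + 10)) none)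
    (PySem.Chars.find (PySem.Chars.slice remaining (some (PySem.Chars.find remaining pvFenceOpenA + 10)) none) pvFenceCloseA + 3)
  have ht : (PySem.Chars.find remaining pvFenceOpenA + 10).toNat
      = (PySem.Chars.find remaining pvFenceOpenA).toNat + 10 := by omega
  omega

-- the 'while remaining:' loop of A, with 'segments' as accumulator
def pvLoopA (segments : List (List (String × String))) (remaining : List Char) :
    List (List (String × String)) :=
  if hrem : remaining = [] then segments
  else
    let start := PySem.Chars.find remaining pvFenceOpenA
    if hs : start = -1 then
      segments ++ [[("type", "text"), ("content", String.ofList remaining)]]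
    else
      let segments1 :=
        if start > 0 then
          segments ++ [[("type", "text"), ("content",
            String.ofList (PySem.Chars.slice remaining none (some start)))]]
        else segments
      let rest := PySem.Chars.slice remaining (some (start + 10)) none
      let e := PySem.Chars.find rest pvFenceCloseA
      if he : e = -1 then
        segments1 ++ [[("type", "text"), ("content", String.ofList (pvFenceOpenA ++ rest))]]
      else
        let mermaidSrc := PySem.Chars.strip (PySem.Chars.slice rest none (some e))
        pvLoopA (segments1 ++ [[("type", "mermaid"), ("content", String.ofList mermaidSrc)]])
          (PySem.Chars.slice rest (some (e + 3)) none)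
  termination_by remaining.length
  decreasing_by
    · exact pvLoopA_dec remaining hs

def md_to_segments_py (md : String) : List (List (String × String)) :=
  if md.toList = [] then [] else pvLoopA [] md.toList

-- ===== PORT B =====
-- s.partition(sep) = (pre, sep, rest) (first occurrence; (s,'','') if absent); hand port, exact
def pvPartitionB (s sep : List Char) : List Char × List Char × List Char :=
  let i := PySem.Chars.find s sep
  if i = -1 then (s, [], []) else (s.take i.toNat, sep, s.drop (i.toNat + sep.length))

def pvSegB (ty : String) (content : List Char) : List (String × String) :=
  [("type", ty), ("content", String.ofList content)]

def pvFenceB : List Char := "```mermaid".toList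
def pvCloseB : List Char := "```".toList

-- termination helpers for pvGoB
theorem pvPartB_len_le (s sep : List Char) : (pvPartitionB s sep).2.2.length ≤ s.length := by
  simp only [pvPartitionB]
  split
  · simp
  · simp

theorem pvPartB_len_lt (s sep : List Char) (h : (pvPartitionB s sep).2.1 ≠ []) :
    (pvPartitionB s sep).2.2.length + sep.length ≤ s.length := by
  simp only [pvPartitionB] at h ⊢
  by_cases hi : PySem.Chars.find s sep = -1
  · simp [hi] at h
  · obtain ⟨hocc, h0⟩ := pvFind_occ s sep hi
    rw [if_neg hi] at h ⊢
    simp only [List.length_drop]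
    omega

theorem pvGoB_dec (s : List Char)
    (hsep : ¬ (pvPartitionB s pvFenceB).2.1 = []) :
    (pvPartitionB (pvPartitionB s pvFenceB).2.2 pvCloseB).2.2.length < s.length := by
  have h1 := pvPartB_len_le (pvPartitionB s pvFenceB).2.2 pvCloseB
  have h2 := pvPartB_len_lt s pvFenceB hsep
  have h3 : pvFenceB.length = 10 := rfl
  omega

-- B's 'go': one segment group per recursion step, via partition
def pvGoB (s : List Char) : List (List (String × String)) :=
  if hs : s = [] then []
  else
    let p := pvPartitionB s pvFenceB
    if hsep : p.2.1 = [] then [pvSegB "text" s]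
    else
      let head := if p.1 ≠ [] then [pvSegB "text" p.1] else []
      let q := pvPartitionB p.2.2 pvCloseB
      if hq : q.2.1 = [] then head ++ [pvSegB "text" (pvFenceB ++ p.2.2)]
      else head ++ [pvSegB "mermaid" (PySem.Chars.strip q.1)] ++ pvGoB q.2.2
  termination_by s.length
  decreasing_by
    · exact pvGoB_dec s hsep

def md_to_segments_py_alt (md : String) : List (List (String × String)) :=
  pvGoB md.toList

-- ===== PRECONDITION & SPEC =====
def Spec_md_to_segments_py (md : String) (out : List (List (String × String))) : Prop := out = md_to_segments_py_alt md
instance (md : String) (out : List (List (String × String))) : Decidable (Spec_md_to_segments_py md out) := by unfold Spec_md_to_segments_py; infer_instance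

-- ===== CLAIM (what is proved, stated in full; the proofs are below) =====
def Claim_equal_md_to_segments_py : Prop := ∀ (md : String), Dom_md_to_segments_py md → Spec_md_to_segments_py md (md_to_segments_py md)

-- ===== LEMMAS AND PROOFS =====

theorem pvLoopA_eq_goB : ∀ (n : ℕ) (rem : List Char), rem.length ≤ n →
    ∀ segments, pvLoopA segments rem = segments ++ pvGoB rem := by
  intro n
  induction n with
  | zero =>
    intro rem hl segments
    have hnil : rem = [] := by
      cases rem with
      | nil => rfl
      | cons a l => simp at hl
    subst hnil
    rw [pvLoopA, pvGoB]
    simp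
  | succ n ih =>
    intro rem hl segments
    rw [pvLoopA, pvGoB]
    by_cases hrem : rem = []
    · simp [hrem]
    · rw [dif_neg hrem, dif_neg hrem]
      simp only [pvFenceOpenA, pvFenceCloseA, pvFenceB, pvCloseB, pvPartitionB, pvSegB]
      by_cases hf : PySem.Chars.find rem "```mermaid".toList = -1
      · simp only [hf]
        simp
      · simp only [show ("```mermaid".toList : List Char) = ['`','`','`','m','e','r','m','a','i','d'] from rfl,
            show ("```".toList : List Char) = ['`','`','`'] from rfl] at hf ⊢
        obtain ⟨hocc, h0⟩ := pvFind_occ rem ['`','`','`','m','e','r','m','a','i','d'] hf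
        have hL10 : (['`','`','`','m','e','r','m','a','i','d'] : List Char).length = 10 := by decide
        have hLne : (['`','`','`','m','e','r','m','a','i','d'] : List Char) ≠ [] := by decide
        rw [hL10] at hocc
        have e1 : PySem.Chars.slice rem none (some (PySem.Chars.find rem ['`','`','`','m','e','r','m','a','i','d']))
            = rem.take (PySem.Chars.find rem ['`','`','`','m','e','r','m','a','i','d']).toNat := by
          rw [PySem.Chars.slice_eq_listSlice, PySem.List.slice_to _ h0]
        have e2 : PySem.Chars.slice rem (some (PySem.Chars.find rem ['`','`','`','m','e','r','m','a','i','d'] + 10)) none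
            = rem.drop ((PySem.Chars.find rem ['`','`','`','m','e','r','m','a','i','d']).toNat + 10) := by
          rw [PySem.Chars.slice_eq_listSlice, PySem.List.slice_from _ (by omega)]
          congr 1
          omega
        simp only [if_neg hf, hL10, e1, e2]
        simp only [dif_neg hf, dif_neg hLne]
        have hiff : (List.take (PySem.Chars.find rem ['`','`','`','m','e','r','m','a','i','d']).toNat rem ≠ []) ↔
            (PySem.Chars.find rem ['`','`','`','m','e','r','m','a','i','d'] > 0) := by
          rw [ne_eq, List.take_eq_nil_iff]
          simp only [hrem, or_false]
          omega
        by_cases he : PySem.Chars.find (List.drop ((PySem.Chars.find rem ['`','`','`','m','e','r','m','a','i','d']).toNat + 10) rem) ['`','`','`'] = -1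
        · simp only [if_pos he, dif_pos he]
          by_cases hpos : PySem.Chars.find rem ['`','`','`','m','e','r','m','a','i','d'] > 0 <;>
            simp [hiff, hpos]
        · obtain ⟨hocc2, h02⟩ := pvFind_occ (List.drop ((PySem.Chars.find rem ['`','`','`','m','e','r','m','a','i','d']).toNat + 10) rem) ['`','`','`'] he
          have e3 : PySem.Chars.slice (List.drop ((PySem.Chars.find rem ['`','`','`','m','e','r','m','a','i','d']).toNat + 10) rem)
              (some (PySem.Chars.find (List.drop ((PySem.Chars.find rem ['`','`','`','m','e','r','m','a','i','d']).toNat + 10) rem) ['`','`','`'] + 3)) none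
              = List.drop ((PySem.Chars.find (List.drop ((PySem.Chars.find rem ['`','`','`','m','e','r','m','a','i','d']).toNat + 10) rem) ['`','`','`']).toNat + 3)
                  (List.drop ((PySem.Chars.find rem ['`','`','`','m','e','r','m','a','i','d']).toNat + 10) rem) := by
            rw [PySem.Chars.slice_eq_listSlice, PySem.List.slice_from _ (by omega)]
            congr 1
            omega
          have e4 : PySem.Chars.slice (List.drop ((PySem.Chars.find rem ['`','`','`','m','e','r','m','a','i','d']).toNat + 10) rem) none
              (some (PySem.Chars.find (List.drop ((PySem.Chars.find rem ['`','`','`','m','e','r','m','a','i','d']).toNat + 10) rem) ['`','`','`']))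
              = List.take ((PySem.Chars.find (List.drop ((PySem.Chars.find rem ['`','`','`','m','e','r','m','a','i','d']).toNat + 10) rem) ['`','`','`']).toNat)
                  (List.drop ((PySem.Chars.find rem ['`','`','`','m','e','r','m','a','i','d']).toNat + 10) rem) := by
            rw [PySem.Chars.slice_eq_listSlice, PySem.List.slice_to _ h02]
          have hlen2 : (List.drop ((PySem.Chars.find (List.drop ((PySem.Chars.find rem ['`','`','`','m','e','r','m','a','i','d']).toNat + 10) rem) ['`','`','`']).toNat + 3)
              (List.drop ((PySem.Chars.find rem ['`','`','`','m','e','r','m','a','i','d']).toNat + 10) rem)).length ≤ n := by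
            simp only [List.length_drop]
            omega
          simp only [dif_neg he, if_neg he, e3, e4]
          rw [ih _ hlen2]
          by_cases hpos : PySem.Chars.find rem ['`','`','`','m','e','r','m','a','i','d'] > 0 <;>
            simp [hiff, hpos]

-- ===== VERDICT (by name: the statement is the Claim_ definition above) =====
theorem md_to_segments_py_spec : Claim_equal_md_to_segments_py := by
  intro md _
  unfold Spec_md_to_segments_py md_to_segments_py md_to_segments_py_alt
  split
  · rename_i h; rw [h, pvGoB]; simp
  · simpa using pvLoopA_eq_goB md.toList.length md.toList le_rfl []
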